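-- pv_equiv track=rewrite | github.com/mjohnson11/VLTE_PIPELINES | WGS/.ipynb_checkpoints/process_files_and_run_go-checkpoint.py | get_mutation_impact
-- ===== SOURCE A (Python) =====
-- def get_mutation_impact(ann):
--     if len(str(ann).split('|'))>1:
--         if str(ann).split('|')[1]=='SV':
--             return 'SV'
--         splitter = str(ann).split(',')
--         for mt in mutation_impacts_in_consequence_order:
--             for s in splitter:
--                 if len(s.split('|'))>2:
--                     if s.split('|')[2] == mt:
--                         return mt
--     # if none of the listed types, call it NA
--     return 'NA'
--
-- mutation_impacts_in_consequence_order = ['HIGH', 'MODERATE', 'LOW', 'MODIFIER']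
-- ===== SOURCE B (Python) =====
-- mutation_impacts_in_consequence_order = ['HIGH', 'MODERATE', 'LOW', 'MODIFIER']
--
-- _IMPACT_RANK = {'HIGH': 0, 'MODERATE': 1, 'LOW': 2, 'MODIFIER': 3}
--
-- def get_mutation_impact(ann):
--     parts = str(ann).split('|')
--     if len(parts) <= 1:
--         return 'NA'
--     if parts[1] == 'SV':
--         return 'SV'
--     # single pass: minimize the numeric rank of the impacts seen
--     best = 4
--     for s in str(ann).split(','):
--         f = s.split('|')
--         if len(f) > 2:
--             best = min(best, _IMPACT_RANK.get(f[2], 4))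
--     return ('HIGH', 'MODERATE', 'LOW', 'MODIFIER', 'NA')[best]
-- ===== Notes on version B (the rewrite author's own statement) =====
-- stated objective: simpler
-- what changed: A performs an ordered search: for each impact level in priority order it rescans and re-splits every annotation field looking for a match; B instead maps each field's impact to a numeric rank and computes the minimum rank in one pass with an integer accumulator, then indexes the rank back into the name table.
import Mathlib
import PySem

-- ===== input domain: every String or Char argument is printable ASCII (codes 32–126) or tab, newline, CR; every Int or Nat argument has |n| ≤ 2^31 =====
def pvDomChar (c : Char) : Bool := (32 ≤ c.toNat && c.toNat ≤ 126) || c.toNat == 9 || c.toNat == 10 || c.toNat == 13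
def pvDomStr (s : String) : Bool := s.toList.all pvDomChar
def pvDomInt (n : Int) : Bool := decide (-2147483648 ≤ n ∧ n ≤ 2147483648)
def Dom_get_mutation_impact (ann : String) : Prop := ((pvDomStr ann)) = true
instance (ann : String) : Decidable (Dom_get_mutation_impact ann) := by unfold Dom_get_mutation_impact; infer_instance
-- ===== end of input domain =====

-- B replaces A's priority-ordered repeated rescan by a single pass minimizing a numeric
-- impact rank, then maps the minimum rank back to its name: objective 'simpler'.

-- ===== PORT A =====
-- s.split(sep) for a nonempty sep, via PySem.Chars.splitOn (exact)
def pvSplit (s sep : String) : List String :=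
  (PySem.Chars.splitOn s.toList sep.toList).map (fun cs => String.ofList cs)

def mutationImpactsOrder : List String := ["HIGH", "MODERATE", "LOW", "MODIFIER"]

-- A's inner 'for s in splitter: if …: return mt' — returns mt iff some field matches
def pvHitA (splitter : List String) (mt : String) : Bool :=
  splitter.any (fun s =>
    decide ((pvSplit s "|").length > 2) && ((pvSplit s "|").getD 2 "" == mt))

def pvLoopA (splitter : List String) : List String → String
  | [] => "NA"
  | mt :: rest => if pvHitA splitter mt then mt else pvLoopA splitter rest

def get_mutation_impact (ann : String) : String :=
  if (pvSplit ann "|").length > 1 then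
    if (pvSplit ann "|").getD 1 "" == "SV" then "SV"
    else pvLoopA (pvSplit ann ",") mutationImpactsOrder
  else "NA"

-- ===== PORT B =====
-- _IMPACT_RANK.get(x, 4)
def pvRank (x : String) : Nat :=
  if x == "HIGH" then 0 else if x == "MODERATE" then 1
  else if x == "LOW" then 2 else if x == "MODIFIER" then 3 else 4

-- one loop step: best = min(best, rank) when the field has a third component
def pvBestStep (b : Nat) (s : String) : Nat :=
  let f := pvSplit s "|"
  if f.length > 2 then min b (pvRank (f.getD 2 "")) else b

def get_mutation_impact_alt (ann : String) : String :=
  let parts := pvSplit ann "|"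
  if parts.length ≤ 1 then "NA"
  else if parts.getD 1 "" == "SV" then "SV"
  else
    let best := (pvSplit ann ",").foldl pvBestStep 4
    ["HIGH", "MODERATE", "LOW", "MODIFIER", "NA"].getD best "NA"

-- ===== PRECONDITION & SPEC =====
def Spec_get_mutation_impact (ann : String) (out : String) : Prop := out = get_mutation_impact_alt ann
instance (ann : String) (out : String) : Decidable (Spec_get_mutation_impact ann out) := by unfold Spec_get_mutation_impact; infer_instance

-- ===== CLAIM (what is proved, stated in full; the proofs are below) =====
def Claim_equal_get_mutation_impact : Prop := ∀ (ann : String), Dom_get_mutation_impact ann → Spec_get_mutation_impact ann (get_mutation_impact ann)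

-- ===== LEMMAS AND PROOFS =====

theorem foldl_best_le (fields : List String) (k : Nat) : ∀ (acc : Nat),
    fields.foldl pvBestStep acc ≤ k ↔
      acc ≤ k ∨ ∃ s ∈ fields, (pvSplit s "|").length > 2 ∧ pvRank ((pvSplit s "|").getD 2 "") ≤ k := by
  induction fields with
  | nil => intro acc; simp
  | cons s rest ih =>
    intro acc
    rw [List.foldl_cons, ih]
    simp only [pvBestStep, List.mem_cons]
    by_cases h : (pvSplit s "|").length > 2
    · simp only [h, if_pos, min_le_iff]
      constructor
      · rintro (⟨h1 | h1⟩ | ⟨x, hx, hp⟩)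
        · exact Or.inl h1
        · exact Or.inr ⟨s, Or.inl rfl, h, h1⟩
        · exact Or.inr ⟨x, Or.inr hx, hp⟩
      · rintro (h1 | ⟨x, (rfl | hx), hp⟩)
        · exact Or.inl (Or.inl h1)
        · exact Or.inl (Or.inr hp.2)
        · exact Or.inr ⟨x, hx, hp⟩
    · simp only [h, if_neg, not_false_iff]
      constructor
      · rintro (h1 | ⟨x, hx, hp⟩)
        · exact Or.inl h1
        · exact Or.inr ⟨x, Or.inr hx, hp⟩
      · rintro (h1 | ⟨x, (rfl | hx), hp⟩)
        · exact Or.inl h1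
        · exact absurd hp.1 h
        · exact Or.inr ⟨x, hx, hp⟩

theorem hit_iff (fields : List String) (mt : String) :
    pvHitA fields mt = true ↔
      ∃ s ∈ fields, (pvSplit s "|").length > 2 ∧ (pvSplit s "|").getD 2 "" = mt := by
  simp [pvHitA]

theorem rank_le_0 (x : String) : pvRank x ≤ 0 ↔ x = "HIGH" := by
  unfold pvRank; split_ifs with h1 h2 h3 h4 <;> simp_all
theorem rank_le_1 (x : String) : pvRank x ≤ 1 ↔ x = "HIGH" ∨ x = "MODERATE" := by
  unfold pvRank; split_ifs with h1 h2 h3 h4 <;> simp_all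
theorem rank_le_2 (x : String) : pvRank x ≤ 2 ↔ x = "HIGH" ∨ x = "MODERATE" ∨ x = "LOW" := by
  unfold pvRank; split_ifs with h1 h2 h3 h4 <;> simp_all
theorem rank_le_3 (x : String) : pvRank x ≤ 3 ↔ x = "HIGH" ∨ x = "MODERATE" ∨ x = "LOW" ∨ x = "MODIFIER" := by
  unfold pvRank; split_ifs with h1 h2 h3 h4 <;> simp_all

theorem loop_eq_best (splitter : List String) :
    pvLoopA splitter mutationImpactsOrder =
      ["HIGH", "MODERATE", "LOW", "MODIFIER", "NA"].getD (splitter.foldl pvBestStep 4) "NA" := by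
  set best := splitter.foldl pvBestStep 4 with hbest
  have h4 : best ≤ 4 := by rw [hbest, foldl_best_le]; exact Or.inl le_rfl
  have e0 : best ≤ 0 ↔ pvHitA splitter "HIGH" = true := by
    rw [hbest, foldl_best_le, hit_iff]
    constructor
    · rintro (h | ⟨s, hs, hl, hr⟩)
      · omega
      · exact ⟨s, hs, hl, (rank_le_0 _).mp hr⟩
    · rintro ⟨s, hs, hl, hr⟩
      exact Or.inr ⟨s, hs, hl, (rank_le_0 _).mpr hr⟩
  have e1 : best ≤ 1 ↔ (pvHitA splitter "HIGH" = true ∨ pvHitA splitter "MODERATE" = true) := by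
    rw [hbest, foldl_best_le, hit_iff, hit_iff]
    simp only [rank_le_1]
    constructor
    · rintro (h | ⟨s, hs, hl, (hr | hr)⟩)
      · omega
      · exact Or.inl ⟨s, hs, hl, hr⟩
      · exact Or.inr ⟨s, hs, hl, hr⟩
    · rintro (⟨s, hs, hl, hr⟩ | ⟨s, hs, hl, hr⟩)
      · exact Or.inr ⟨s, hs, hl, Or.inl hr⟩
      · exact Or.inr ⟨s, hs, hl, Or.inr hr⟩
  have e2 : best ≤ 2 ↔ (pvHitA splitter "HIGH" = true ∨ pvHitA splitter "MODERATE" = true ∨ pvHitA splitter "LOW" = true) := by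
    rw [hbest, foldl_best_le, hit_iff, hit_iff, hit_iff]
    simp only [rank_le_2]
    constructor
    · rintro (h | ⟨s, hs, hl, (hr | hr | hr)⟩)
      · omega
      · exact Or.inl ⟨s, hs, hl, hr⟩
      · exact Or.inr (Or.inl ⟨s, hs, hl, hr⟩)
      · exact Or.inr (Or.inr ⟨s, hs, hl, hr⟩)
    · rintro (⟨s, hs, hl, hr⟩ | ⟨s, hs, hl, hr⟩ | ⟨s, hs, hl, hr⟩)
      · exact Or.inr ⟨s, hs, hl, Or.inl hr⟩
      · exact Or.inr ⟨s, hs, hl, Or.inr (Or.inl hr)⟩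
      · exact Or.inr ⟨s, hs, hl, Or.inr (Or.inr hr)⟩
  have e3 : best ≤ 3 ↔ (pvHitA splitter "HIGH" = true ∨ pvHitA splitter "MODERATE" = true ∨ pvHitA splitter "LOW" = true ∨ pvHitA splitter "MODIFIER" = true) := by
    rw [hbest, foldl_best_le, hit_iff, hit_iff, hit_iff, hit_iff]
    simp only [rank_le_3]
    constructor
    · rintro (h | ⟨s, hs, hl, (hr | hr | hr | hr)⟩)
      · omega
      · exact Or.inl ⟨s, hs, hl, hr⟩
      · exact Or.inr (Or.inl ⟨s, hs, hl, hr⟩)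
      · exact Or.inr (Or.inr (Or.inl ⟨s, hs, hl, hr⟩))
      · exact Or.inr (Or.inr (Or.inr ⟨s, hs, hl, hr⟩))
    · rintro (⟨s, hs, hl, hr⟩ | ⟨s, hs, hl, hr⟩ | ⟨s, hs, hl, hr⟩ | ⟨s, hs, hl, hr⟩)
      · exact Or.inr ⟨s, hs, hl, Or.inl hr⟩
      · exact Or.inr ⟨s, hs, hl, Or.inr (Or.inl hr)⟩
      · exact Or.inr ⟨s, hs, hl, Or.inr (Or.inr (Or.inl hr))⟩
      · exact Or.inr ⟨s, hs, hl, Or.inr (Or.inr (Or.inr hr))⟩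
  by_cases hH : pvHitA splitter "HIGH" = true
  · have hb : best = 0 := Nat.le_zero.mp (e0.mpr hH)
    simp [pvLoopA, mutationImpactsOrder, hH, hb]
  · by_cases hM : pvHitA splitter "MODERATE" = true
    · have hb : best = 1 := by
        have := e1.mpr (Or.inr hM)
        have h0 : ¬ best ≤ 0 := fun h => hH (e0.mp h)
        omega
      simp [pvLoopA, mutationImpactsOrder, hH, hM, hb]
    · by_cases hL : pvHitA splitter "LOW" = true
      · have hb : best = 2 := by
          have := e2.mpr (Or.inr (Or.inr hL))
          have h1 : ¬ best ≤ 1 := fun h => (e1.mp h).elim hH hM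
          omega
        simp [pvLoopA, mutationImpactsOrder, hH, hM, hL, hb]
      · by_cases hMo : pvHitA splitter "MODIFIER" = true
        · have hb : best = 3 := by
            have := e3.mpr (Or.inr (Or.inr (Or.inr hMo)))
            have h2 : ¬ best ≤ 2 := fun h => (e2.mp h).elim hH (fun h' => h'.elim hM hL)
            omega
          simp [pvLoopA, mutationImpactsOrder, hH, hM, hL, hMo, hb]
        · have hb : best = 4 := by
            have h3 : ¬ best ≤ 3 := fun h =>
              (e3.mp h).elim hH (fun h' => h'.elim hM (fun h'' => h''.elim hL hMo))
            omega
          simp [pvLoopA, mutationImpactsOrder, hH, hM, hL, hMo, hb]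

-- ===== VERDICT (by name: the statement is the Claim_ definition above) =====
theorem get_mutation_impact_spec : Claim_equal_get_mutation_impact := by
  intro ann _
  unfold Spec_get_mutation_impact get_mutation_impact get_mutation_impact_alt
  simp only [loop_eq_best]
  by_cases h1 : (pvSplit ann "|").length > 1 <;> simp [h1]
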